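-- pv_equiv track=rewrite | github.com/igorcs08/LOGICA | trab1_logica.py | lista_indices
-- ===== SOURCE A (Python) =====
-- conectivos = ['&', '|', '>', '~']
--
-- def lista_indices(formula):
--     i = 0
--     abre = []
--     lsub = []
--     while i < len(formula):
--         if (formula[i] == '('):
--             abre.append(i)
--         elif (formula[i] == ')'):
--             inicio = abre.pop()
--             if (formula[inicio-1] == conectivos[3]):
--                 adicionar = formula[inicio-1:i+1]
--                 if not (adicionar in lsub):
--                     lsub.append(formula[inicio-1:i+1])
--             adicionar = formula[inicio:i+1]
--             if not (adicionar in lsub):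
--                 lsub.append(formula[inicio:i+1])
--         i += 1
--     return lsub
-- ===== SOURCE B (Python) =====
-- def lista_indices(formula):
--     lsub = []
--     for j in range(len(formula)):
--         if formula[j] != ')':
--             continue
--         # find the matching '(' by scanning backwards, counting balance
--         depth = 0
--         k = j - 1
--         match = None
--         while k >= 0:
--             if formula[k] == ')':
--                 depth += 1
--             elif formula[k] == '(':
--                 if depth == 0:
--                     match = k
--                     break
--                 depth -= 1
--             k -= 1
--         if match is None:
--             continue  # unmatched ')': nothing to collect
--         if formula[match-1] == '~':
--             s = formula[match-1:j+1]
--             if s not in lsub: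
--                 lsub.append(s)
--         s = formula[match:j+1]
--         if s not in lsub:
--             lsub.append(s)
--     return lsub
-- ===== Notes on version B (the rewrite author's own statement) =====
-- stated objective: alternative
-- what changed: B drops the explicit stack of open-parenthesis indices: at each ')' it finds the matching '(' by a backward balance-counting scan, emitting the same slices in the same order with the same dedup.
import Mathlib
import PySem

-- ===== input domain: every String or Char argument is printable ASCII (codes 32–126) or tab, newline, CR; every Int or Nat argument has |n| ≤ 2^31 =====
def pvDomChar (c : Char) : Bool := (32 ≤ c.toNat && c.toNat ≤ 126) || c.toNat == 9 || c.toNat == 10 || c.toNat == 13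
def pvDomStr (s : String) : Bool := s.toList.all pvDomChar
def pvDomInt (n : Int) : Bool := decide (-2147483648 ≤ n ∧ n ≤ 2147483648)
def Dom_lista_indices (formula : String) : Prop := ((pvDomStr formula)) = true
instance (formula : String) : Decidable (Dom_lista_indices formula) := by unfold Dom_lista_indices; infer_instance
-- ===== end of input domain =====

-- B replaces A's explicit stack of open-parenthesis indices by a backward balance-counting
-- scan at each ')' (alternative algorithm, similar cost); return values agree wherever A returns.

-- ===== PORT A =====
-- A's while loop: state (i, abre, lsub); abre.append/pop ported as ++ [i] / getLast?+dropLast.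
-- fuel only makes the recursion structural; fuel = cs.length - i iterations remain.
def pvLoopA (cs : List Char) : Nat → Nat → List Nat → List String → List String
  | 0, _, _, lsub => lsub
  | fuel + 1, i, abre, lsub =>
    if i < cs.length then
      let c := cs.getD i ' '
      if c = '(' then pvLoopA cs fuel (i + 1) (abre ++ [i]) lsub
      else if c = ')' then
        match abre.getLast? with
        | none => lsub  -- Python: abre.pop() raises IndexError here; excluded by Pre_
        | some inicio =>
          let lsub1 :=
            if PySem.List.pyGet? cs ((inicio : Int) - 1) = some '~' then
              let adicionar := String.ofList (PySem.List.slice cs (some ((inicio : Int) - 1)) (some ((i : Int) + 1)))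
              if adicionar ∈ lsub then lsub else lsub ++ [adicionar]
            else lsub
          let adicionar := String.ofList (PySem.List.slice cs (some (inicio : Int)) (some ((i : Int) + 1)))
          let lsub2 := if adicionar ∈ lsub1 then lsub1 else lsub1 ++ [adicionar]
          pvLoopA cs fuel (i + 1) abre.dropLast lsub2
      else pvLoopA cs fuel (i + 1) abre lsub
    else lsub

def lista_indices (formula : String) : List String :=
  pvLoopA formula.toList formula.toList.length 0 [] []

-- ===== PORT B =====
-- B's inner while loop: scan backwards from position k-1 for the '(' matching the current ')'.
def pvBackscan (cs : List Char) : Nat → Nat → Option Nat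
  | 0, _ => none
  | k' + 1, depth =>
    let c := cs.getD k' ' '
    if c = ')' then pvBackscan cs k' (depth + 1)
    else if c = '(' then
      if depth = 0 then some k' else pvBackscan cs k' (depth - 1)
    else pvBackscan cs k' depth

-- B's outer for loop over positions j (fuel makes it structural; fuel = cs.length - j).
def pvLoopB (cs : List Char) : Nat → Nat → List String → List String
  | 0, _, lsub => lsub
  | fuel + 1, j, lsub =>
    if j < cs.length then
      if cs.getD j ' ' = ')' then
        match pvBackscan cs j 0 with
        | none => pvLoopB cs fuel (j + 1) lsub  -- unmatched ')': nothing to collect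
        | some k =>
          let lsub1 :=
            if PySem.List.pyGet? cs ((k : Int) - 1) = some '~' then
              let s := String.ofList (PySem.List.slice cs (some ((k : Int) - 1)) (some ((j : Int) + 1)))
              if s ∈ lsub then lsub else lsub ++ [s]
            else lsub
          let s := String.ofList (PySem.List.slice cs (some (k : Int)) (some ((j : Int) + 1)))
          let lsub2 := if s ∈ lsub1 then lsub1 else lsub1 ++ [s]
          pvLoopB cs fuel (j + 1) lsub2
      else pvLoopB cs fuel (j + 1) lsub
    else lsub

def lista_indices_alt (formula : String) : List String :=
  pvLoopB formula.toList formula.toList.length 0 []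

-- ===== PRECONDITION & SPEC =====
-- Pre_ excludes exactly the formulas on which A raises IndexError (a ')' with no open '(' left).
def Pre_lista_indices (formula : String) : Prop :=
  ∀ i, i ≤ formula.toList.length →
    (formula.toList.take i).count ')' ≤ (formula.toList.take i).count '('

instance (formula : String) : Decidable (Pre_lista_indices formula) := by
  unfold Pre_lista_indices; infer_instance

def pvWitness_lista_indices : String := "(~(p&q))"

def Spec_lista_indices (formula : String) (out : List String) : Prop := out = lista_indices_alt formula
instance (formula : String) (out : List String) : Decidable (Spec_lista_indices formula out) := by unfold Spec_lista_indices; infer_instance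

-- ===== CLAIM (what is proved, stated in full; the proofs are below) =====
def Claim_equal_lista_indices : Prop := ∀ (formula : String), Dom_lista_indices formula → Pre_lista_indices formula → Spec_lista_indices formula (lista_indices formula)

-- ===== LEMMAS AND PROOFS =====

-- The evolution of A's stack over the prefix of length i.
def pvStack (cs : List Char) : Nat → List Nat
  | 0 => []
  | i + 1 =>
    let s := pvStack cs i
    let c := cs.getD i ' '
    if c = '(' then s ++ [i] else if c = ')' then s.dropLast else s

-- B's backward scan reads the stack of unmatched opens from the top.
theorem pvBackscan_eq (cs : List Char) :
    ∀ k depth, pvBackscan cs k depth = (pvStack cs k).reverse[depth]? := by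
  intro k
  induction k with
  | zero => intro depth; simp [pvBackscan, pvStack]
  | succ k' ih =>
    intro depth
    simp only [pvBackscan, pvStack]
    by_cases hc : cs[k']?.getD ' ' = ')'
    · simp [hc, ih, ← List.tail_reverse, List.getElem?_tail]
    · by_cases ho : cs[k']?.getD ' ' = '('
      · cases depth with
        | zero => simp [hc, ho]
        | succ d => simp [hc, ho, ih]
      · simp [hc, ho, ih]

theorem pvStack_len (cs : List Char) (hpre : ∀ i, i ≤ cs.length →
    (cs.take i).count ')' ≤ (cs.take i).count '(') :
    ∀ i, i ≤ cs.length →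
      (pvStack cs i).length + (cs.take i).count ')' = (cs.take i).count '(' := by
  intro i
  induction i with
  | zero => intro _; simp [pvStack]
  | succ i ih =>
    intro hi
    have hi' : i < cs.length := hi
    have ihl := ih (Nat.le_of_lt hi')
    have htake : cs.take (i + 1) = cs.take i ++ [cs[i]] := List.take_succ_eq_append_getElem hi'
    have hgd : cs.getD i ' ' = cs[i] := List.getD_eq_getElem cs ' ' hi'
    simp only [pvStack, hgd]
    by_cases hc : cs[i] = '('
    · simp only [hc, if_pos rfl, htake, List.count_append, List.length_append]
      simp; omega
    · by_cases hc2 : cs[i] = ')'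
      · have hpre1 := hpre (i + 1) hi
        rw [htake] at hpre1
        simp only [List.count_append] at hpre1
        simp only [hc2, List.count_singleton] at hpre1
        have hd : 1 ≤ (pvStack cs i).length := by
          simp at hpre1; omega
        have hne : ¬ cs[i] = '(' := hc
        simp only [hc2, hne, if_neg, if_pos rfl, htake, List.count_append,
          List.length_dropLast]
        simp [if_neg hne]; omega
      · simp only [htake, List.count_append, if_neg hc, if_neg hc2]
        simp [hc, hc2]; omega

theorem pvStack_ne_nil (cs : List Char) (hpre : ∀ i, i ≤ cs.length →
    (cs.take i).count ')' ≤ (cs.take i).count '(') (i : Nat) (hi : i < cs.length)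
    (hc : cs[i] = ')') : pvStack cs i ≠ [] := by
  have h1 := pvStack_len cs hpre i (Nat.le_of_lt hi)
  have h2 := hpre (i + 1) hi
  have htake : cs.take (i + 1) = cs.take i ++ [cs[i]] := List.take_succ_eq_append_getElem hi
  rw [htake] at h2
  simp only [List.count_append, hc] at h2
  intro hnil
  rw [hnil] at h1
  simp at h1 h2
  omega

theorem pvLoop_eq (cs : List Char) (hpre : ∀ i, i ≤ cs.length →
    (cs.take i).count ')' ≤ (cs.take i).count '(') :
    ∀ fuel i lsub, pvLoopA cs fuel i (pvStack cs i) lsub = pvLoopB cs fuel i lsub := by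
  intro fuel
  induction fuel with
  | zero => intro i lsub; rfl
  | succ fuel ih =>
    intro i lsub
    by_cases hi : i < cs.length
    · have hgd : cs.getD i ' ' = cs[i] := List.getD_eq_getElem cs ' ' hi
      have hgd' : cs[i]?.getD ' ' = cs[i] := by
        simp [List.getElem?_eq_getElem hi]
      rw [pvLoopA, pvLoopB]
      rw [if_pos hi, if_pos hi]
      by_cases hc : cs[i] = '('
      · have hne : ¬ cs[i] = ')' := by rw [hc]; decide
        have hstep : pvStack cs (i + 1) = pvStack cs i ++ [i] := by
          simp [pvStack, hgd, hgd', hc]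
        simp only [hgd, hgd', hc, if_pos rfl, if_neg hne]
        rw [← hstep]; exact ih (i + 1) lsub
      · by_cases hc2 : cs[i] = ')'
        · have hnil : pvStack cs i ≠ [] := pvStack_ne_nil cs hpre i hi hc2
          have hlast : (pvStack cs i).getLast? = some ((pvStack cs i).getLast hnil) :=
            List.getLast?_eq_some_getLast hnil
          have hpos : 0 < (pvStack cs i).reverse.length := by
            simp [List.length_reverse]; exact List.length_pos_iff.mpr hnil
          have hback : pvBackscan cs i 0 = some ((pvStack cs i).getLast hnil) := by
            rw [pvBackscan_eq]
            rw [List.getElem?_eq_getElem hpos]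
            rw [Option.some_inj]
            rw [List.getElem_reverse, List.getLast_eq_getElem hnil]
            simp
          have hstep : pvStack cs (i + 1) = (pvStack cs i).dropLast := by
            simp [pvStack, hgd, hgd', hc, hc2]
          simp only [hgd, hgd', if_neg hc, hc2, if_pos rfl, hlast, hback]
          rw [← hstep]
          exact ih (i + 1) _
        · have hstep : pvStack cs (i + 1) = pvStack cs i := by
            simp [pvStack, hgd, hgd', hc, hc2]
          simp only [hgd, hgd', if_neg hc, if_neg hc2]
          rw [← hstep]; exact ih (i + 1) lsub
    · rw [pvLoopA, pvLoopB]; simp [hi]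

-- ===== VERDICT (by name: the statement is the Claim_ definition above) =====
theorem lista_indices_spec : Claim_equal_lista_indices := by
  intro formula _ hpre
  unfold Spec_lista_indices lista_indices lista_indices_alt
  have h := pvLoop_eq formula.toList hpre formula.toList.length 0 []
  simpa [pvStack] using h
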